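-- pv_equiv track=rewrite | github.com/giovanni-fantini/coding-tests | python_finance/bhdg.py | solution
-- ===== SOURCE A (Python) =====
-- class Pump:
--     def __init__(self, fuel_capacity):
--         self.fuel_capacity = fuel_capacity
--         self.car = None
--
-- class GasStation:
--     def __init__(self, pumps):
--         self.pumps = pumps
--
--     def pumps_have_capacity(self, fuel_required):
--         return any(pump for pump in self.pumps if pump.fuel_capacity >= fuel_required)
--
--     def free_pump(self, fuel_required):
--         for pump in self.pumps:
--             if pump.fuel_capacity >= fuel_required and not pump.car:
--                 return pump
--
--         return None
--
--     def resolve_fuel_up(self):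
--         min_fuel_need = min(pump.car.fuel_need for pump in self.pumps if pump.car)
--
--         cars_all_fueled_up = []
--
--         for pump in self.pumps:
--             if pump.car:
--                 pump.car.fuel_need -= min_fuel_need
--                 pump.fuel_capacity -= min_fuel_need
--
--                 if pump.car.fuel_need <= 0:
--                     cars_all_fueled_up.append(pump.car)
--                     pump.car = None
--
--         return cars_all_fueled_up, min_fuel_need
--
--     def are_cars_fueling_up(self):
--         for pump in self.pumps:
--             if pump.car:
--                 return True
--
--         return False
--
-- class Car:
--     def __init__(self, fuel_need):
--         self.fuel_need = fuel_need
--         self.wait_time = 0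
--
-- def solution(A, X, Y, Z):
--     gas_station = GasStation([Pump(fuel_capacity=X), Pump(fuel_capacity=Y), Pump(fuel_capacity=Z)])
--     line = [Car(fuel_need=fuel_need) for fuel_need in A]
--     ready_cars = []
--
--     while len(line) > 0 or gas_station.are_cars_fueling_up():
--         if len(line) > 0:
--             if not gas_station.pumps_have_capacity(fuel_required=line[0].fuel_need):
--                 return -1
--
--             free_pump = gas_station.free_pump(fuel_required=line[0].fuel_need)
--
--         if free_pump and len(line) > 0:
--             free_pump.car = line.pop(0)
--             continue
--
--         else:
--             resolved_cars, fuel_used = gas_station.resolve_fuel_up()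
--             for car in line:
--                 car.wait_time += fuel_used
--             ready_cars.extend(resolved_cars)
--
--     return max(car.wait_time for car in ready_cars)
-- ===== SOURCE B (Python) =====
-- def solution(A, X, Y, Z):
--     # O(n) per-car simulation: running cumulative fuel time; each car's wait is the
--     # elapsed time at the moment it is assigned to a pump, so no per-queue updates.
--     pumps = [[X, None], [Y, None], [Z, None]]  # [remaining capacity, remaining need or None]
--     elapsed = 0
--     max_wait = 0
--     for need in A:
--         while True:
--             if not any(cap >= need for cap, _ in pumps):
--                 return -1
--             free = next((p for p in pumps if p[0] >= need and p[1] is None), None)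
--             if free is not None:
--                 free[1] = need
--                 if elapsed > max_wait:
--                     max_wait = elapsed
--                 break
--             m = min(p[1] for p in pumps if p[1] is not None)
--             elapsed += m
--             for p in pumps:
--                 if p[1] is not None:
--                     p[0] -= m
--                     p[1] = p[1] - m if p[1] - m > 0 else None
--     return max_wait
-- ===== Notes on version B (the rewrite author's own statement) =====
-- stated objective: faster
-- what changed: Replaces the object-based simulation that re-walks the whole waiting line after every fuel-up (car.wait_time += fuel_used for each queued car) and then drains the pumps with a scalar running elapsed-time counter: each car's wait equals the cumulative fuel time at the instant it is assigned to a pump, so B records it once at assignment, keeps only a running maximum, and stops as soon as the last car is assigned.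
import Mathlib
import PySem

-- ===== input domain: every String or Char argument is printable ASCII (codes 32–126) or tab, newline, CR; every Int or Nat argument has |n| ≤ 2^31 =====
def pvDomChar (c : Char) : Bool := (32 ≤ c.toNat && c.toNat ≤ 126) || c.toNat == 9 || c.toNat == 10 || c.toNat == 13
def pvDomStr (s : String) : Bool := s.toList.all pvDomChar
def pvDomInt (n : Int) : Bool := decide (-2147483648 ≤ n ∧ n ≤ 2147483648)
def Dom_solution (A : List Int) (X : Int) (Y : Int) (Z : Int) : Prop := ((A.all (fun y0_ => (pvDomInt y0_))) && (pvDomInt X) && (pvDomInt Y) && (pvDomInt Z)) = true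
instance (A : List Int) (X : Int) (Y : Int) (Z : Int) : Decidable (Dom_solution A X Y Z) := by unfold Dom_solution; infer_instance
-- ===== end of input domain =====

-- B replaces A's O(n^2) simulation (every fuel-up walks the whole waiting line to bump
-- each queued car's wait_time, then the pumps are drained) by an O(n) one: a running
-- cumulative elapsed-fuel counter; a car's wait is the elapsed value at the moment it is
-- assigned to a pump, so B keeps only a running maximum and stops at the last assignment.
-- (Equivalence is about the return value; neither program mutates its arguments.)

-- ===== PORT A =====
-- a pump is (fuel_capacity, optional car); a car is (fuel_need, wait_time)

def pumpsHaveCapacity (pumps : List (Int × Option (Int × Int))) (req : Int) : Bool :=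
  pumps.any (fun p => decide (req ≤ p.1))

-- free_pump + the assignment `free_pump.car = line.pop(0)`: first pump with
-- capacity ≥ req and no car gets the car
def assignFirst : List (Int × Option (Int × Int)) → Int → (Int × Int) →
    Option (List (Int × Option (Int × Int)))
  | [], _, _ => none
  | (c, o) :: rest, req, car =>
    if req ≤ c ∧ o = none then some ((c, some car) :: rest)
    else (assignFirst rest req car).map (fun ps => (c, o) :: ps)

def minNeedsA (pumps : List (Int × Option (Int × Int))) : Option Int :=
  PySem.List.min? ((pumps.filterMap (fun p => p.2)).map (fun c => c.1)) (fun x => x)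

-- the mutation pass of resolve_fuel_up: returns (new pumps, cars_all_fueled_up)
def resolveGoA (m : Int) : List (Int × Option (Int × Int)) →
    List (Int × Option (Int × Int)) × List (Int × Int)
  | [] => ([], [])
  | (c, o) :: rest =>
    let r := resolveGoA m rest
    match o with
    | some car =>
      if car.1 - m ≤ 0 then ((c - m, none) :: r.1, (car.1 - m, car.2) :: r.2)
      else ((c - m, some (car.1 - m, car.2)) :: r.1, r.2)
    | none => ((c, none) :: r.1, r.2)

def anyCarsA (pumps : List (Int × Option (Int × Int))) : Bool :=
  pumps.any (fun p => p.2.isSome)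

def loopA : Nat → List (Int × Option (Int × Int)) → List (Int × Int) → List (Int × Int) → Int
  | 0, _, _, _ => 0   -- fuel exhausted; never reached from `solution` (see measure lemma)
  | f + 1, pumps, line, ready =>
    if line.length > 0 || anyCarsA pumps then
      match line with
      | car :: rest =>
        if ¬ pumpsHaveCapacity pumps car.1 then -1
        else
          match assignFirst pumps car.1 car with
          | some pumps' => loopA f pumps' rest ready
          | none =>
            let m := (minNeedsA pumps).getD 0  -- getD never used: some car is at a pump here
            let r := resolveGoA m pumps
            loopA f r.1 ((car :: rest).map (fun d => (d.1, d.2 + m))) (ready ++ r.2)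
      | [] =>
        let m := (minNeedsA pumps).getD 0
        let r := resolveGoA m pumps
        loopA f r.1 [] (ready ++ r.2)
    else
      match PySem.List.max? (ready.map (fun d => d.2)) (fun x => x) with
      | some v => v
      | none => 0   -- Python raises ValueError here (only for A = []); excluded by Pre_solution

def solution (A : List Int) (X : Int) (Y : Int) (Z : Int) : Int :=
  loopA (2 * A.length + 4) [(X, none), (Y, none), (Z, none)] (A.map (fun n => (n, 0))) []

-- ===== PORT B =====
-- a pump is (remaining capacity, remaining need of its car or none)

def anyCapB (pumps : List (Int × Option Int)) (req : Int) : Bool :=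
  pumps.any (fun p => decide (req ≤ p.1))

def assignB : List (Int × Option Int) → Int → Option (List (Int × Option Int))
  | [], _ => none
  | (c, o) :: rest, req =>
    if req ≤ c ∧ o = none then some ((c, some req) :: rest)
    else (assignB rest req).map (fun ps => (c, o) :: ps)

def minB (pumps : List (Int × Option Int)) : Option Int :=
  PySem.List.min? (pumps.filterMap (fun p => p.2)) (fun x => x)

def resolveB (m : Int) : List (Int × Option Int) → List (Int × Option Int)
  | [] => []
  | (c, o) :: rest =>
    (match o with
     | some n => (c - m, if 0 < n - m then some (n - m) else none)
     | none => (c, none)) :: resolveB m rest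

-- inner `while True`: fuel 4 always suffices (each resolve frees at least one of 3 pumps)
def innerB : Nat → List (Int × Option Int) → Int → Int → Option (List (Int × Option Int) × Int)
  | 0, _, _, _ => none
  | f + 1, pumps, need, e =>
    if ¬ anyCapB pumps need then none
    else
      match assignB pumps need with
      | some pumps' => some (pumps', e)
      | none =>
        let m := (minB pumps).getD 0
        innerB f (resolveB m pumps) need (e + m)

def outerB : List Int → List (Int × Option Int) → Int → Int → Int
  | [], _, _, maxw => maxw
  | need :: rest, pumps, e, maxw =>
    match innerB 4 pumps need e with
    | none => -1
    | some pe => outerB rest pe.1 pe.2 (if maxw < pe.2 then pe.2 else maxw)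

def solution_alt (A : List Int) (X : Int) (Y : Int) (Z : Int) : Int :=
  outerB A [(X, none), (Y, none), (Z, none)] 0 0

-- ===== PRECONDITION & SPEC =====
-- Pre_ excludes only the empty car list, on which the Python A raises ValueError
-- (max() over no ready cars).
def Pre_solution (A : List Int) (X : Int) (Y : Int) (Z : Int) : Prop := A ≠ []
instance (A : List Int) (X : Int) (Y : Int) (Z : Int) : Decidable (Pre_solution A X Y Z) := by
  unfold Pre_solution; infer_instance
def pvWitness_solution : List Int × Int × Int × Int := ([2, 3], 5, 5, 5)

def Spec_solution (A : List Int) (X : Int) (Y : Int) (Z : Int) (out : Int) : Prop :=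
  out = solution_alt A X Y Z
instance (A : List Int) (X : Int) (Y : Int) (Z : Int) (out : Int) :
    Decidable (Spec_solution A X Y Z out) := by unfold Spec_solution; infer_instance

-- ===== CLAIM (what is proved, stated in full; the proofs are below) =====
def Claim_equal_solution : Prop := ∀ (A : List Int) (X : Int) (Y : Int) (Z : Int),
  Dom_solution A X Y Z → Pre_solution A X Y Z → Spec_solution A X Y Z (solution A X Y Z)

-- ===== LEMMAS AND PROOFS =====

-- projection from A's pump state (cars carry wait times) to B's (remaining needs only)
def projP (p : Int × Option (Int × Int)) : Int × Option Int := (p.1, p.2.map (fun c => c.1))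
def projA (l : List (Int × Option (Int × Int))) : List (Int × Option Int) := l.map projP
def occA (pumps : List (Int × Option (Int × Int))) : Nat := pumps.countP (fun p => p.2.isSome)
def occB (pumps : List (Int × Option Int)) : Nat := pumps.countP (fun p => p.2.isSome)
def waitsA (pumps : List (Int × Option (Int × Int))) : List Int :=
  pumps.filterMap (fun p => p.2.map (fun c => c.2))

-- the simulation invariant
def InvS (pumps : List (Int × Option (Int × Int))) (line ready : List (Int × Int))
    (e maxw : Int) : Prop :=
  pumps.length = 3 ∧
  (∀ c ∈ line, c.2 = e) ∧
  maxw = (ready.map (fun d => d.2) ++ waitsA pumps).foldl max 0 ∧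
  ((ready.map (fun d => d.2) ++ waitsA pumps) = [] → e = 0) ∧
  ((ready.map (fun d => d.2) ++ waitsA pumps) ≠ [] →
    ∃ w ∈ ready.map (fun d => d.2) ++ waitsA pumps, 0 ≤ w)

lemma anyCapB_proj (pumps : List (Int × Option (Int × Int))) (req : Int) :
    anyCapB (projA pumps) req = pumpsHaveCapacity pumps req := by
  simp [anyCapB, pumpsHaveCapacity, projA, List.any_map]
  rfl

lemma occB_proj (pumps : List (Int × Option (Int × Int))) :
    occB (projA pumps) = occA pumps := by
  simp only [occB, occA, projA, List.countP_map]
  congr 1; funext p; simp [projP]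

lemma minB_proj (pumps : List (Int × Option (Int × Int))) :
    minB (projA pumps) = minNeedsA pumps := by
  have h : (projA pumps).filterMap (fun p => p.2)
      = (pumps.filterMap (fun p => p.2)).map (fun c => c.1) := by
    induction pumps with
    | nil => rfl
    | cons p rest ih =>
      cases p with | mk c o =>
        cases o <;>
          simp only [projA, projP, List.map_cons, List.filterMap_cons, Option.map_none,
            Option.map_some] <;> simp [projA] at ih ⊢ <;> exact ih
  simp [minB, minNeedsA, h]

lemma assignB_proj_none (pumps : List (Int × Option (Int × Int))) (req : Int) (car : Int × Int)
    (h : assignFirst pumps req car = none) : assignB (projA pumps) req = none := by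
  induction pumps with
  | nil => rfl
  | cons p rest ih =>
    cases p with | mk c o =>
    rw [assignFirst] at h
    by_cases hc : req ≤ c ∧ o = none
    · rw [if_pos hc] at h; exact absurd h (by simp)
    · rw [if_neg hc] at h
      have h' := Option.map_eq_none_iff.mp h
      show assignB ((c, o.map (fun d => d.1)) :: projA rest) req = none
      rw [assignB, if_neg (by simpa [Option.map_eq_none_iff] using hc),
        Option.map_eq_none_iff]
      exact ih h'

lemma assignFirst_some (pumps : List (Int × Option (Int × Int))) (req : Int) (car : Int × Int)
    (hc1 : car.1 = req) (q : List (Int × Option (Int × Int)))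
    (h : assignFirst pumps req car = some q) :
    assignB (projA pumps) req = some (projA q) ∧
    (waitsA q).Perm (car.2 :: waitsA pumps) ∧
    occA q = occA pumps + 1 ∧ q.length = pumps.length := by
  induction pumps generalizing q with
  | nil => exact absurd h (by simp [assignFirst])
  | cons p rest ih =>
    cases p with | mk c o =>
    rw [assignFirst] at h
    by_cases hc : req ≤ c ∧ o = none
    · rw [if_pos hc] at h
      injection h with h; subst h; subst hc1
      obtain ⟨hle, rfl⟩ := hc
      refine ⟨?_, ?_, ?_, ?_⟩
      · show assignB ((c, Option.map (fun d : Int × Int => d.1) none) :: projA rest) car.1 = _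
        rw [assignB]
        rw [if_pos (by simpa using hle)]
        simp [projA, projP]
      · simp [waitsA]
      · simp [occA]
      · simp
    · rw [if_neg hc] at h
      rcases Option.map_eq_some_iff.mp h with ⟨q', hq', rfl⟩
      obtain ⟨hB, hperm, hocc, hlen⟩ := ih q' hq'
      refine ⟨?_, ?_, ?_, ?_⟩
      · show assignB ((c, o.map (fun d => d.1)) :: projA rest) req = _
        rw [assignB, if_neg (by simpa [Option.map_eq_none_iff] using hc), hB]
        simp [projA, projP]
      · cases o with
        | none => simpa [waitsA] using hperm
        | some car' =>
          simp only [waitsA, List.filterMap_cons, Option.map_some] at *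
          exact (hperm.cons car'.2).trans (List.Perm.swap _ _ _)
      · simp only [occA, List.countP_cons] at *
        omega
      · simp [hlen]

lemma assignFirst_none (pumps : List (Int × Option (Int × Int))) (req : Int) (car : Int × Int)
    (h : assignFirst pumps req car = none) :
    ∀ p ∈ pumps, req ≤ p.1 → p.2 ≠ none := by
  induction pumps with
  | nil => intro p hp; simp at hp
  | cons q rest ih =>
    cases q with | mk c o =>
    rw [assignFirst] at h
    by_cases hc : req ≤ c ∧ o = none
    · rw [if_pos hc] at h; exact absurd h (by simp)
    · rw [if_neg hc] at h
      intro p hp hle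
      rcases List.mem_cons.mp hp with rfl | hmem
      · intro ho; exact hc ⟨hle, ho⟩
      · exact ih (Option.map_eq_none_iff.mp h) p hmem hle

lemma resolveB_proj (m : Int) (pumps : List (Int × Option (Int × Int))) :
    resolveB m (projA pumps) = projA (resolveGoA m pumps).1 := by
  induction pumps with
  | nil => rfl
  | cons p rest ih =>
    cases p with | mk c o =>
    cases o with
    | none => simp [projA, projP, resolveB, resolveGoA] at *; exact ih
    | some car =>
      show resolveB m ((c, some car.1) :: projA rest) = _
      rw [resolveB]
      by_cases hm : car.1 - m ≤ 0
      · have : ¬ (0 < car.1 - m) := by omega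
        simp only [resolveGoA, this, if_pos hm, reduceIte]
        simp [projA, projP]
        simpa [projA] using ih
      · have : (0 < car.1 - m) := by omega
        simp only [resolveGoA, this, if_neg hm, reduceIte]
        simp [projA, projP]
        simpa [projA] using ih

lemma resolveGoA_waits (m : Int) (pumps : List (Int × Option (Int × Int))) :
    (waitsA (resolveGoA m pumps).1 ++ (resolveGoA m pumps).2.map (fun d => d.2)).Perm
      (waitsA pumps) := by
  induction pumps with
  | nil => simp [resolveGoA, waitsA]
  | cons p rest ih =>
    cases p with | mk c o =>
    cases o with
    | none => simpa [resolveGoA, waitsA] using ih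
    | some car =>
      by_cases hm : car.1 - m ≤ 0
      · simp only [resolveGoA, if_pos hm, waitsA, List.filterMap_cons, Option.map_none,
          Option.map_some, List.map_cons]
        exact (List.perm_middle).trans (ih.cons car.2)
      · simp only [resolveGoA, if_neg hm, waitsA, List.filterMap_cons, Option.map_some,
          List.cons_append]
        exact ih.cons car.2

lemma resolveGoA_length (m : Int) (pumps : List (Int × Option (Int × Int))) :
    (resolveGoA m pumps).1.length = pumps.length := by
  induction pumps with
  | nil => rfl
  | cons p rest ih =>
    cases p with | mk c o =>
    cases o with
    | none => simp [resolveGoA]; exact ih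
    | some car => by_cases hm : car.1 - m ≤ 0 <;> simp [resolveGoA, hm] <;> exact ih

lemma resolveGoA_occ_le (m : Int) (pumps : List (Int × Option (Int × Int))) :
    occA (resolveGoA m pumps).1 ≤ occA pumps := by
  induction pumps with
  | nil => simp [resolveGoA, occA]
  | cons p rest ih =>
    cases p with | mk c o =>
    cases o with
    | none => simpa [resolveGoA, occA, List.countP_cons] using ih
    | some car =>
      by_cases hm : car.1 - m ≤ 0 <;>
        simp only [resolveGoA, hm, reduceIte, occA, List.countP_cons] at * <;> simp <;> omega

lemma resolveGoA_occ_lt (m : Int) (pumps : List (Int × Option (Int × Int)))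
    (h : ∃ p ∈ pumps, ∃ n w, p.2 = some (n, w) ∧ n - m ≤ 0) :
    occA (resolveGoA m pumps).1 < occA pumps := by
  induction pumps with
  | nil => simp at h
  | cons p rest ih =>
    cases p with | mk c o =>
    rcases h with ⟨p', hp', n, w, hsome, hn⟩
    rcases List.mem_cons.mp hp' with rfl | hmem
    · simp only at hsome; subst hsome
      simp only [resolveGoA, if_pos hn, occA, List.countP_cons]
      have := resolveGoA_occ_le m rest
      simp only [occA] at this
      simp; omega
    · have hrec := ih ⟨p', hmem, n, w, hsome, hn⟩
      simp only [occA, List.countP_cons] at *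
      cases o with
      | none => simpa [resolveGoA] using hrec
      | some car =>
        by_cases hm : car.1 - m ≤ 0 <;>
          simp only [resolveGoA, hm, reduceIte, List.countP_cons] <;> simp <;> omega

lemma assignB_none (pumps : List (Int × Option Int)) (req : Int)
    (h : assignB pumps req = none) : ∀ p ∈ pumps, req ≤ p.1 → p.2 ≠ none := by
  induction pumps with
  | nil => intro p hp; simp at hp
  | cons q rest ih =>
    cases q with | mk c o =>
    rw [assignB] at h
    by_cases hc : req ≤ c ∧ o = none
    · rw [if_pos hc] at h; exact absurd h (by simp)
    · rw [if_neg hc] at h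
      intro p hp hle
      rcases List.mem_cons.mp hp with rfl | hmem
      · intro ho; exact hc ⟨hle, ho⟩
      · exact ih (Option.map_eq_none_iff.mp h) p hmem hle

lemma resolveB_occ_le (m : Int) (pumps : List (Int × Option Int)) :
    occB (resolveB m pumps) ≤ occB pumps := by
  induction pumps with
  | nil => simp [resolveB, occB]
  | cons p rest ih =>
    cases p with | mk c o =>
    cases o with
    | none => simpa [resolveB, occB, List.countP_cons] using ih
    | some n =>
      by_cases hm : 0 < n - m <;>
        simp only [resolveB, hm, reduceIte, occB, List.countP_cons] at * <;> simp <;> omega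

lemma resolveB_occ_lt' (m : Int) (pumps : List (Int × Option Int))
    (h : ∃ p ∈ pumps, ∃ n, p.2 = some n ∧ n - m ≤ 0) :
    occB (resolveB m pumps) < occB pumps := by
  induction pumps with
  | nil => simp at h
  | cons p rest ih =>
    cases p with | mk c o =>
    rcases h with ⟨p', hp', n, hsome, hn⟩
    rcases List.mem_cons.mp hp' with rfl | hmem
    · simp only at hsome; subst hsome
      have hm : ¬ (0 < n - m) := by omega
      simp only [resolveB, hm, reduceIte, occB, List.countP_cons]
      have := resolveB_occ_le m rest
      simp only [occB] at this
      simp; omega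
    · have hrec := ih ⟨p', hmem, n, hsome, hn⟩
      simp only [occB, List.countP_cons] at *
      cases o with
      | none => simpa [resolveB] using hrec
      | some k =>
        by_cases hm : 0 < k - m <;>
          simp only [resolveB, hm, reduceIte, List.countP_cons] <;> simp <;> omega

lemma resolveB_occ_lt (pumps : List (Int × Option Int)) (req : Int)
    (hcap : anyCapB pumps req = true) (hass : assignB pumps req = none) :
    occB (resolveB ((minB pumps).getD 0) pumps) < occB pumps := by
  rcases List.any_eq_true.mp hcap with ⟨p, hp, hle⟩
  have hocc := assignB_none pumps req hass p hp (of_decide_eq_true hle)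
  have hne : pumps.filterMap (fun p => p.2) ≠ [] := by
    intro hempty
    rcases Option.ne_none_iff_exists'.mp hocc with ⟨n, hn⟩
    have : n ∈ pumps.filterMap (fun p => p.2) := List.mem_filterMap.mpr ⟨p, hp, hn⟩
    simp [hempty] at this
  obtain ⟨m, hm⟩ : ∃ m, minB pumps = some m := by
    cases hmin : minB pumps with
    | none => exact absurd (PySem.List.min?_eq_none_iff _ _ |>.mp hmin) hne
    | some m => exact ⟨m, rfl⟩
  have hmem := PySem.List.min?_mem hm
  rcases List.mem_filterMap.mp hmem with ⟨p', hp', hsome⟩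
  rw [hm]
  exact resolveB_occ_lt' m pumps ⟨p', hp', m, hsome, by omega⟩

lemma innerB_fuel (f g : Nat) (pumps : List (Int × Option Int)) (need e : Int)
    (hf : occB pumps < f) (hg : occB pumps < g) :
    innerB f pumps need e = innerB g pumps need e := by
  induction f generalizing g pumps e with
  | zero => omega
  | succ f ih =>
    cases g with
    | zero => omega
    | succ g =>
      rw [innerB, innerB]
      by_cases hcap : anyCapB pumps need = true
      · simp only [hcap, not_true, if_false]
        cases hass : assignB pumps need with
        | some pumps' => rfl
        | none =>
          have hlt := resolveB_occ_lt pumps need hcap hass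
          exact ih g _ _ (by omega) (by omega)
      · simp [hcap]

lemma foldl_max_le (l : List Int) (v : Int) : ∀ a : Int, a ≤ v → (∀ y ∈ l, y ≤ v) →
    l.foldl max a ≤ v := by
  induction l with
  | nil => intro a ha _; simpa using ha
  | cons x t ih =>
    intro a ha hall
    simp only [List.foldl_cons]
    exact ih (max a x) (max_le ha (hall x List.mem_cons_self)) fun y hy => hall y (List.mem_cons_of_mem _ hy)

lemma waitsA_nil_of_anyCars_false (pumps : List (Int × Option (Int × Int)))
    (h : anyCarsA pumps = false) : waitsA pumps = [] := by
  rw [waitsA, List.filterMap_eq_nil_iff]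
  intro p hp
  have := List.any_eq_false.mp h p hp
  have hnone : p.2 = none := by
    cases hp2 : p.2 with
    | none => rfl
    | some c => rw [hp2] at this; simp at this
  simp [hnone]

lemma minNeedsA_attained (pumps : List (Int × Option (Int × Int)))
    (p₀ : Int × Option (Int × Int)) (hp₀ : p₀ ∈ pumps) (h : p₀.2 ≠ none) :
    ∃ m, minNeedsA pumps = some m ∧ ∃ p ∈ pumps, ∃ w, p.2 = some (m, w) := by
  rcases Option.ne_none_iff_exists'.mp h with ⟨car, hcar⟩
  have hne : (pumps.filterMap (fun p => p.2)).map (fun c => c.1) ≠ [] := by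
    have : car ∈ pumps.filterMap (fun p => p.2) := List.mem_filterMap.mpr ⟨p₀, hp₀, hcar⟩
    intro hempty
    rw [List.map_eq_nil_iff.mp hempty] at this
    simp at this
  obtain ⟨m, hm⟩ : ∃ m, minNeedsA pumps = some m := by
    cases hmin : minNeedsA pumps with
    | none => exact absurd (PySem.List.min?_eq_none_iff _ _ |>.mp hmin) hne
    | some m => exact ⟨m, rfl⟩
  have hmem := PySem.List.min?_mem hm
  rcases List.mem_map.mp hmem with ⟨car', hcar', rfl⟩
  rcases List.mem_filterMap.mp hcar' with ⟨p', hp', hsome⟩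
  exact ⟨car'.1, hm, p', hp', car'.2, by simpa using hsome⟩

lemma main_lemma : ∀ (f : Nat) (pumps : List (Int × Option (Int × Int)))
    (line ready : List (Int × Int)) (e maxw : Int),
    2 * line.length + occA pumps < f →
    InvS pumps line ready e maxw →
    loopA f pumps line ready = outerB (line.map (fun d => d.1)) (projA pumps) e maxw := by
  intro f
  induction f with
  | zero => intro pumps line ready e maxw hm _; omega
  | succ f ih =>
    intro pumps line ready e maxw hm hinv
    obtain ⟨hlen3, hline, hmax, hempty0, hwit⟩ := hinv
    have hoccle : occA pumps ≤ 3 := by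
      simpa [hlen3, occA] using List.countP_le_length (l := pumps) (p := fun p => p.2.isSome)
    cases line with
    | cons car rest =>
      rw [loopA]
      have hg : (decide ((car :: rest).length > 0) || anyCarsA pumps) = true := by simp
      rw [if_pos hg]
      simp only [List.map_cons, outerB]
      by_cases hcap : pumpsHaveCapacity pumps car.1 = true
      · rw [if_neg (by simp [hcap])]
        rw [innerB, if_neg (by simp [anyCapB_proj, hcap])]
        cases hass : assignFirst pumps car.1 car with
        | some q =>
          obtain ⟨hB, hperm, hocc, hlen⟩ := assignFirst_some pumps car.1 car rfl q hass
          rw [hB]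
          have hcar2 : car.2 = e := hline car List.mem_cons_self
          have h1 : (waitsA q).Perm (e :: waitsA pumps) := by rw [← hcar2]; exact hperm
          have hW : (ready.map (fun d => d.2) ++ waitsA q).Perm
              ((ready.map (fun d => d.2) ++ waitsA pumps) ++ [e]) :=
            (h1.append_left _).trans
              (List.perm_middle.trans (List.perm_append_singleton _ _).symm)
          show loopA f q rest ready
              = outerB (rest.map (fun d => d.1)) (projA q) e (if maxw < e then e else maxw)
          apply ih
          · simp only [List.length_cons] at hm ⊢; omega
          · refine ⟨by rw [hlen, hlen3], fun c hc => hline c (List.mem_cons_of_mem _ hc),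
              ?_, ?_, ?_⟩
            · rw [hW.foldl_op_eq, List.foldl_append, ← hmax]
              simp only [List.foldl_cons, List.foldl_nil]
              split_ifs <;> omega
            · intro habs
              have hl := hW.length_eq
              rw [habs] at hl
              simp at hl
            · intro _
              by_cases hWold : (ready.map (fun d => d.2) ++ waitsA pumps) = []
              · refine ⟨e, ?_, by rw [hempty0 hWold]⟩
                rw [hW.mem_iff]
                simp
              · obtain ⟨w, hwmem, hw0⟩ := hwit hWold
                refine ⟨w, ?_, hw0⟩
                rw [hW.mem_iff]
                exact List.mem_append.mpr (Or.inl hwmem)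
        | none =>
          rcases List.any_eq_true.mp hcap with ⟨p, hp, hle'⟩
          have hpne := assignFirst_none pumps car.1 car hass p hp (of_decide_eq_true hle')
          obtain ⟨m, hmin, p', hp', w', hp's⟩ := minNeedsA_attained pumps p hp hpne
          rw [assignB_proj_none pumps car.1 car hass, minB_proj, hmin]
          simp only [Option.getD_some]
          rw [resolveB_proj]
          have hoccr : occA (resolveGoA m pumps).1 < occA pumps :=
            resolveGoA_occ_lt m pumps ⟨p', hp', m, w', hp's, by omega⟩
          rw [innerB_fuel 3 4 (projA (resolveGoA m pumps).1) car.1 (e + m)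
            (by rw [occB_proj]; omega) (by rw [occB_proj]; omega)]
          have hwmem' : w' ∈ waitsA pumps := List.mem_filterMap.mpr ⟨p', hp', by simp [hp's]⟩
          have hWoldne : (ready.map (fun d => d.2) ++ waitsA pumps) ≠ [] :=
            List.ne_nil_of_mem (List.mem_append_right _ hwmem')
          have hpermW : (((ready ++ (resolveGoA m pumps).2).map (fun d => d.2)) ++
              waitsA (resolveGoA m pumps).1).Perm
              (ready.map (fun d => d.2) ++ waitsA pumps) := by
            rw [List.map_append, List.append_assoc]
            exact List.Perm.append_left _ (List.perm_append_comm.trans (resolveGoA_waits m pumps))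
          rw [ih (resolveGoA m pumps).1
            ((car.1, car.2 + m) :: rest.map (fun d => (d.1, d.2 + m)))
            (ready ++ (resolveGoA m pumps).2) (e + m) maxw
            (by simp only [List.length_map, List.length_cons] at hm ⊢; omega)
            ⟨by rw [resolveGoA_length, hlen3],
             fun c hc => by
               rcases List.mem_cons.mp hc with rfl | hc
               · simp [hline car List.mem_cons_self]
               · rcases List.mem_map.mp hc with ⟨d, hd, rfl⟩
                 simp [hline d (List.mem_cons_of_mem _ hd)],
             by rw [hpermW.foldl_op_eq]; exact hmax,
             fun habs => absurd (by
               have hl := hpermW.length_eq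
               rw [habs] at hl
               exact (List.eq_nil_of_length_eq_zero hl.symm)) hWoldne,
             fun _ => by
               obtain ⟨w, hwmem, hw0⟩ := hwit hWoldne
               exact ⟨w, hpermW.mem_iff.mpr hwmem, hw0⟩⟩]
          simp only [List.map_cons, List.map_map]
          show outerB (car.1 :: rest.map (fun d => d.1)) _ _ _ = _
          rw [outerB]
      · rw [if_pos (by simp [hcap]), innerB, if_pos (by simp [anyCapB_proj, hcap])]
    | nil =>
      simp only [List.map_nil, outerB]
      cases hAny : anyCarsA pumps with
      | false =>
        rw [loopA, if_neg (by simp [hAny])]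
        have hwnil := waitsA_nil_of_anyCars_false pumps hAny
        rw [hwnil, List.append_nil] at hmax hwit
        cases hready : ready.map (fun d => d.2) with
        | nil =>
          rw [hready] at hmax
          simp only [List.foldl_nil] at hmax
          have : PySem.List.max? ([] : List Int) (fun x => x) = none := rfl
          rw [this, hmax]
        | cons r0 rs =>
          rw [hready] at hmax hwit
          obtain ⟨v, hmv⟩ : ∃ v, PySem.List.max? (r0 :: rs) (fun x => x) = some v := by
            cases hmv : PySem.List.max? (r0 :: rs) (fun x => x) with
            | none => exact absurd (PySem.List.max?_eq_none_iff _ _ |>.mp hmv) (by simp)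
            | some v => exact ⟨v, rfl⟩
          rw [hmv]
          have hvmem := PySem.List.max?_mem hmv
          have hvmax := PySem.List.max?_isMax hmv
          obtain ⟨w, hwmem, hw0⟩ := hwit (by simp)
          have h0v : (0 : Int) ≤ v := le_trans hw0 (hvmax w hwmem)
          rw [hmax]
          show v = List.foldl max 0 (r0 :: rs)
          exact le_antisymm ((PySem.List.le_foldl_max (r0 :: rs) 0).2 v hvmem)
            (foldl_max_le (r0 :: rs) v 0 h0v hvmax)
      | true =>
        rw [loopA, if_pos (by simp [hAny])]
        rcases List.any_eq_true.mp hAny with ⟨p, hp, hps⟩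
        have hpne : p.2 ≠ none := by
          intro hn; rw [hn] at hps; simp at hps
        obtain ⟨m, hmin, p', hp', w', hp's⟩ := minNeedsA_attained pumps p hp hpne
        rw [hmin]
        simp only [Option.getD_some]
        have hoccr : occA (resolveGoA m pumps).1 < occA pumps :=
          resolveGoA_occ_lt m pumps ⟨p', hp', m, w', hp's, by omega⟩
        have hwmem' : w' ∈ waitsA pumps := List.mem_filterMap.mpr ⟨p', hp', by simp [hp's]⟩
        have hWoldne : (ready.map (fun d => d.2) ++ waitsA pumps) ≠ [] :=
          List.ne_nil_of_mem (List.mem_append_right _ hwmem')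
        have hpermW : (((ready ++ (resolveGoA m pumps).2).map (fun d => d.2)) ++
            waitsA (resolveGoA m pumps).1).Perm
            (ready.map (fun d => d.2) ++ waitsA pumps) := by
          rw [List.map_append, List.append_assoc]
          exact List.Perm.append_left _ (List.perm_append_comm.trans (resolveGoA_waits m pumps))
        rw [ih (resolveGoA m pumps).1 [] (ready ++ (resolveGoA m pumps).2) (e + m) maxw
          (by simp only [List.length_nil] at hm ⊢; omega)
          ⟨by rw [resolveGoA_length, hlen3],
           fun c hc => absurd hc (List.not_mem_nil),
           by rw [hpermW.foldl_op_eq]; exact hmax,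
           fun habs => absurd (by
             have hl := hpermW.length_eq
             rw [habs] at hl
             exact (List.eq_nil_of_length_eq_zero hl.symm)) hWoldne,
           fun _ => by
             obtain ⟨w, hwmem, hw0⟩ := hwit hWoldne
             exact ⟨w, hpermW.mem_iff.mpr hwmem, hw0⟩⟩]
        rfl

-- ===== VERDICT (by name: the statement is the Claim_ definition above) =====
theorem solution_spec : Claim_equal_solution := by
  unfold Claim_equal_solution
  intro A X Y Z _ _
  unfold Spec_solution solution solution_alt
  rw [main_lemma (2 * A.length + 4) [(X, none), (Y, none), (Z, none)]
      (A.map (fun n => (n, 0))) [] 0 0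
      (by simp [occA, List.countP_cons])
      ⟨rfl,
       fun c hc => by rcases List.mem_map.mp hc with ⟨n, _, rfl⟩; rfl,
       rfl,
       fun _ => rfl,
       fun h => absurd rfl h⟩]
  have : ((fun d : Int × Int => d.1) ∘ fun n : Int => (n, 0)) = fun n : Int => n := rfl
  simp [projA, projP, List.map_map, this]
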